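-- pv_equiv track=rewrite | github.com/zibneuro/udvary-et-al-2022 | structural_model/eval_composition.py | mergeCubeStats
-- ===== SOURCE A (Python) =====
-- def mergeCubeStats(results, synapticSide):
--     statsAggregated = {}
--     for stats in results.values():
--         for cube, values in stats.items():
--             if(cube not in statsAggregated):
--                 statsAggregated[cube] = values
--             else:
--                 statsAggregated[cube]["length"] += values["length"]
--                 statsAggregated[cube]["branches"] += values["branches"]
--                 statsAggregated[cube]["contributingCells"] += values["contributingCells"]
--                 if(synapticSide == "pre"):
--                     statsAggregated[cube]["boutons"] += values["boutons"]
--     return statsAggregated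
-- ===== SOURCE B (Python) =====
-- def mergeCubeStats(results, synapticSide):
--     # pass 1: group the per-cube value dicts by cube, in first-appearance order
--     groups = {}
--     for stats in results.values():
--         for cube, values in stats.items():
--             groups.setdefault(cube, []).append(values)
--     # pass 2: fold each group into its first dict (mutated in place, like A)
--     pre = (synapticSide == "pre")
--     out = {}
--     for cube, group in groups.items():
--         agg = group[0]
--         for v in group[1:]:
--             agg["length"] += v["length"]
--             agg["branches"] += v["branches"]
--             agg["contributingCells"] += v["contributingCells"]
--             if pre:
--                 agg["boutons"] += v["boutons"]
--         out[cube] = agg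
--     return out
-- ===== Notes on version B (the rewrite author's own statement) =====
-- stated objective: alternative
-- what changed: B replaces A's single-pass insert-or-merge over a running aggregate dict by two passes: first group all per-cube value dicts by cube with setdefault, then fold each group into its first dict.
import Mathlib
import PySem

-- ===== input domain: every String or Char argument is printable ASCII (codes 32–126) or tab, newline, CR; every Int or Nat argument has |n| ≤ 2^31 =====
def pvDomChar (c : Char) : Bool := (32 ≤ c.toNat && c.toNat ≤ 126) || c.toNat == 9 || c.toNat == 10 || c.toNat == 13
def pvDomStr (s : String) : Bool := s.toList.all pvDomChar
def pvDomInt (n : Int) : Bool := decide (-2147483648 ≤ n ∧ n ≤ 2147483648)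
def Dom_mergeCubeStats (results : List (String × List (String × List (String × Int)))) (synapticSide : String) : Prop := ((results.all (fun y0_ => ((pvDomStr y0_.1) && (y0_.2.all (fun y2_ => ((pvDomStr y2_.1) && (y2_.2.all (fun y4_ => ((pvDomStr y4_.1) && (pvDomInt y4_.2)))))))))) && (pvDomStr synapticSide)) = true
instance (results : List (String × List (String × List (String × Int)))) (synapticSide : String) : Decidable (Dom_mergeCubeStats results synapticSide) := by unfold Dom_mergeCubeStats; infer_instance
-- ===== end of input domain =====

-- B re-implements A by grouping the per-cube dicts first and then folding each group
-- into its first dict (objective: alternative decomposition, same cost).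
-- Both A and B mutate the first-seen inner dicts of `results` in place; the equivalence
-- proved here is about the RETURN value.

-- ===== PORT A =====
-- the merge body of A's else-branch: agg[cube][k] += values[k] for the three stat keys,
-- and for "boutons" when synapticSide == "pre"
def pvMergeValsA (synapticSide : String) (d v : PySem.Dict String Int) : PySem.Dict String Int :=
  let d1 := d.modify "length" 0 (· + v.getD "length" 0)
  let d2 := d1.modify "branches" 0 (· + v.getD "branches" 0)
  let d3 := d2.modify "contributingCells" 0 (· + v.getD "contributingCells" 0)
  if synapticSide == "pre" then d3.modify "boutons" 0 (· + v.getD "boutons" 0) else d3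

def mergeCubeStats (results : List (String × List (String × List (String × Int)))) (synapticSide : String) : List (String × List (String × Int)) :=
  ((results.foldl (fun agg st =>
      st.2.foldl (fun agg p =>
        if agg.contains p.1 = false then agg.insert p.1 (PySem.Dict.mk p.2)
        else agg.modify p.1 PySem.Dict.empty
               (fun d => pvMergeValsA synapticSide d (PySem.Dict.mk p.2))) agg)
    (PySem.Dict.empty : PySem.Dict String (PySem.Dict String Int))).items).map
    (fun q => (q.1, q.2.items))

-- ===== PORT B =====
-- the per-element merge of B's inner fold (pre hoisted to a Bool)
def pvMergeValsB (pre : Bool) (agg v : PySem.Dict String Int) : PySem.Dict String Int :=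
  let a1 := agg.modify "length" 0 (· + v.getD "length" 0)
  let a2 := a1.modify "branches" 0 (· + v.getD "branches" 0)
  let a3 := a2.modify "contributingCells" 0 (· + v.getD "contributingCells" 0)
  if pre then a3.modify "boutons" 0 (· + v.getD "boutons" 0) else a3

-- agg = group[0] folded with group[1:]  (a group built by B is never empty)
def pvFoldGroup (pre : Bool) (group : List (PySem.Dict String Int)) : PySem.Dict String Int :=
  match group with
  | [] => PySem.Dict.empty
  | first :: rest => rest.foldl (fun agg v => pvMergeValsB pre agg v) first

def mergeCubeStats_alt (results : List (String × List (String × List (String × Int)))) (synapticSide : String) : List (String × List (String × Int)) :=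
  let groups := results.foldl (fun g st =>
      st.2.foldl (fun g p => g.modify p.1 [] (· ++ [PySem.Dict.mk p.2])) g)
    (PySem.Dict.empty : PySem.Dict String (List (PySem.Dict String Int)))
  let pre := synapticSide == "pre"
  let out := groups.items.foldl (fun out q => out.insert q.1 (pvFoldGroup pre q.2))
    (PySem.Dict.empty : PySem.Dict String (PySem.Dict String Int))
  out.items.map (fun q => (q.1, q.2.items))

-- ===== PRECONDITION & SPEC =====
-- does this values-dict carry every key the merge branch reads?
def pvHasStatKeys (synapticSide : String) (v : List (String × Int)) : Bool :=
  v.any (·.1 == "length") && v.any (·.1 == "branches") && v.any (·.1 == "contributingCells")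
    && (!(synapticSide == "pre") || v.any (·.1 == "boutons"))

-- Pre_ excludes (a) association lists with duplicate keys at any dict level, which do not
-- correspond to Python dict inputs at all, and (b) inputs on which Python A raises KeyError:
-- a cube occurring more than once whose occurrences lack one of the summed stat keys.
def Pre_mergeCubeStats (results : List (String × List (String × List (String × Int)))) (synapticSide : String) : Prop :=
  (results.map (·.1)).Nodup ∧
  (∀ st ∈ results, (st.2.map (·.1)).Nodup ∧ ∀ p ∈ st.2, (p.2.map (·.1)).Nodup) ∧
  (∀ p ∈ results.flatMap (·.2),
     2 ≤ ((results.flatMap (·.2)).map (·.1)).count p.1 → pvHasStatKeys synapticSide p.2 = true)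
instance (results : List (String × List (String × List (String × Int)))) (synapticSide : String) : Decidable (Pre_mergeCubeStats results synapticSide) := by unfold Pre_mergeCubeStats; infer_instance

def pvWitness_mergeCubeStats : (List (String × List (String × List (String × Int)))) × String :=
  ([("n1", [("c1", [("length", 1), ("branches", 2), ("contributingCells", 3), ("boutons", 4)]),
            ("c2", [("length", 5)])]),
    ("n2", [("c1", [("length", 10), ("branches", 20), ("contributingCells", 30), ("boutons", 40)])])],
   "pre")

def Spec_mergeCubeStats (results : List (String × List (String × List (String × Int)))) (synapticSide : String) (out : List (String × List (String × Int))) : Prop := out = mergeCubeStats_alt results synapticSide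
instance (results : List (String × List (String × List (String × Int)))) (synapticSide : String) (out : List (String × List (String × Int))) : Decidable (Spec_mergeCubeStats results synapticSide out) := by unfold Spec_mergeCubeStats; infer_instance

-- ===== CLAIM (what is proved, stated in full; the proofs are below) =====
def Claim_equal_mergeCubeStats : Prop := ∀ (results : List (String × List (String × List (String × Int)))) (synapticSide : String), Dom_mergeCubeStats results synapticSide → Pre_mergeCubeStats results synapticSide → Spec_mergeCubeStats results synapticSide (mergeCubeStats results synapticSide)

-- ===== LEMMAS AND PROOFS =====

-- A's step over one (cube, values) pair
def pvStepA (side : String) (agg : PySem.Dict String (PySem.Dict String Int)) (p : String × List (String × Int)) : PySem.Dict String (PySem.Dict String Int) :=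
  if agg.contains p.1 = false then agg.insert p.1 (PySem.Dict.mk p.2)
  else agg.modify p.1 PySem.Dict.empty (fun d => pvMergeValsA side d (PySem.Dict.mk p.2))

-- B's grouping step over one (cube, values) pair
def pvStepG (g : PySem.Dict String (List (PySem.Dict String Int))) (p : String × List (String × Int)) : PySem.Dict String (List (PySem.Dict String Int)) :=
  g.modify p.1 [] (· ++ [PySem.Dict.mk p.2])

-- merge all groups of g into single dicts, keeping keys and order
def pvPhi (pre : Bool) (g : PySem.Dict String (List (PySem.Dict String Int))) : PySem.Dict String (PySem.Dict String Int) :=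
  PySem.Dict.mk (g.items.map (fun q => (q.1, pvFoldGroup pre q.2)))

lemma pvMergeValsA_eq (side : String) (d v : PySem.Dict String Int) :
    pvMergeValsA side d v = pvMergeValsB (side == "pre") d v := rfl

lemma pvPhi_contains (pre : Bool) (g : PySem.Dict String (List (PySem.Dict String Int))) (k : String) :
    (pvPhi pre g).contains k = g.contains k := by
  simp only [pvPhi, PySem.Dict.contains, List.any_map]
  rfl

lemma pvPhi_keys (pre : Bool) (g : PySem.Dict String (List (PySem.Dict String Int))) :
    (pvPhi pre g).keys = g.keys := by
  simp only [pvPhi, PySem.Dict.keys, List.map_map]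
  rfl

-- with unique keys, a key determines its value in items
lemma pvItems_unique {ν : Type} (g : PySem.Dict String ν) (hn : g.keys.Nodup)
    {k : String} {a : ν} (ha : (k, a) ∈ g.items) {q : String × ν} (hq : q ∈ g.items)
    (hk : q.1 = k) : q.2 = a := by
  have h1 : g.get? k = some a := PySem.Dict.get?_of_mem_items g ha hn
  have h2 : g.get? k = some q.2 := by
    have : (q.1, q.2) ∈ g.items := by simpa using hq
    exact hk ▸ PySem.Dict.get?_of_mem_items g this hn
  have := h1.symm.trans h2
  simpa using this.symm

lemma pvPhi_items (pre : Bool) (g : PySem.Dict String (List (PySem.Dict String Int))) :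
    (pvPhi pre g).items = g.items.map (fun q => (q.1, pvFoldGroup pre q.2)) := rfl

-- one step: A's insert-or-merge on Φ g mirrors B's grouping step on g
lemma pvStep_comm (pre : Bool) (side : String) (hside : (side == "pre") = pre)
    (g : PySem.Dict String (List (PySem.Dict String Int)))
    (hn : g.keys.Nodup) (hne : ∀ q ∈ g.items, q.2 ≠ [])
    (p : String × List (String × Int)) :
    pvStepA side (pvPhi pre g) p = pvPhi pre (pvStepG g p) := by
  cases hc : g.contains p.1 with
  | false =>
    have hc' : (pvPhi pre g).contains p.1 = false := by rw [pvPhi_contains]; exact hc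
    apply PySem.Dict.ext
    rw [pvStepA, if_pos hc', PySem.Dict.items_insert_of_not_contains _ _ hc']
    rw [pvStepG, PySem.Dict.modify, PySem.Dict.getD_of_not_contains g _ hc]
    rw [pvPhi_items, pvPhi_items, PySem.Dict.items_insert_of_not_contains _ _ hc]
    simp [pvFoldGroup]
  | true =>
    have hc' : (pvPhi pre g).contains p.1 = true := by rw [pvPhi_contains]; exact hc
    obtain ⟨group, hget⟩ : ∃ v, g.get? p.1 = some v := by
      have := PySem.Dict.contains_eq_isSome_get? (d := g) (k := p.1)
      rw [hc] at this
      exact Option.isSome_iff_exists.mp this.symm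
    have hmem : (p.1, group) ∈ g.items := PySem.Dict.mem_items_of_get?_eq_some g hget
    have hgetD : g.getD p.1 [] = group := PySem.Dict.getD_of_get?_eq_some g _ hget
    have hPhiN : (pvPhi pre g).keys.Nodup := by rw [pvPhi_keys]; exact hn
    have hPhimem : (p.1, pvFoldGroup pre group) ∈ (pvPhi pre g).items := by
      rw [pvPhi_items]
      exact List.mem_map_of_mem (f := fun q => (q.1, pvFoldGroup pre q.2)) hmem
    have hPhigetD : (pvPhi pre g).getD p.1 PySem.Dict.empty = pvFoldGroup pre group :=
      PySem.Dict.getD_of_mem_items _ hPhimem hPhiN _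
    obtain ⟨f, r, rfl⟩ : ∃ f r, group = f :: r := by
      cases group with
      | nil => exact absurd rfl (hne _ hmem)
      | cons f r => exact ⟨f, r, rfl⟩
    apply PySem.Dict.ext
    rw [pvStepA, if_neg (by simp [hc']), PySem.Dict.modify, hPhigetD,
        PySem.Dict.items_insert_of_contains _ _ hc']
    rw [pvStepG, PySem.Dict.modify, hgetD]
    rw [pvPhi_items, pvPhi_items, PySem.Dict.items_insert_of_contains _ _ hc]
    rw [List.map_map, List.map_map]
    apply List.map_congr_left
    intro q hq
    by_cases hk : q.1 = p.1
    · have hq2 : q.2 = f :: r := pvItems_unique g hn hmem hq hk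
      simp only [Function.comp_apply, hk, hq2, beq_self_eq_true, if_pos]
      rw [pvMergeValsA_eq, hside]
      simp [pvFoldGroup, List.foldl_append]
    · simp [Function.comp, hk]

-- the grouping step keeps keys unique
lemma pvStepG_nodup (g : PySem.Dict String (List (PySem.Dict String Int)))
    (hn : g.keys.Nodup) (p : String × List (String × Int)) :
    (pvStepG g p).keys.Nodup := by
  rw [pvStepG, PySem.Dict.modify]
  cases hc : g.contains p.1 with
  | true => rw [PySem.Dict.keys_insert_of_contains _ _ hc]; exact hn
  | false =>
    rw [PySem.Dict.keys_insert_of_not_contains _ _ hc]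
    have hnm : p.1 ∉ g.keys := fun h => by
      simp [(PySem.Dict.contains_iff_mem_keys g p.1).mpr h] at hc
    simp only [List.nodup_append, List.nodup_cons, List.not_mem_nil, not_false_eq_true,
      List.nodup_nil, and_true, true_and, hn]
    exact fun a ha b hb h => hnm ((List.mem_singleton.mp hb) ▸ h ▸ ha)

-- the grouping step keeps every group nonempty
lemma pvStepG_ne (g : PySem.Dict String (List (PySem.Dict String Int)))
    (hne : ∀ q ∈ g.items, q.2 ≠ []) (p : String × List (String × Int)) :
    ∀ q ∈ (pvStepG g p).items, q.2 ≠ [] := by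
  intro q hq
  rw [pvStepG, PySem.Dict.modify] at hq
  cases hc : g.contains p.1 with
  | true =>
    rw [PySem.Dict.items_insert_of_contains _ _ hc] at hq
    obtain ⟨q', hq', rfl⟩ := List.mem_map.mp hq
    by_cases hk : (q'.1 == p.1) = true
    · simp [hk]
    · simp only [hk, Bool.false_eq_true, if_false]
      exact hne _ hq'
  | false =>
    rw [PySem.Dict.items_insert_of_not_contains _ _ hc] at hq
    rcases List.mem_append.mp hq with h | h
    · exact hne _ h
    · simp at h
      simp [h]

-- invariant: folding A's step from Φ g equals Φ of folding the grouping step from g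
lemma pvInv (pre : Bool) (side : String) (hside : (side == "pre") = pre)
    (ps : List (String × List (String × Int)))
    (g : PySem.Dict String (List (PySem.Dict String Int)))
    (hn : g.keys.Nodup) (hne : ∀ q ∈ g.items, q.2 ≠ []) :
    ps.foldl (pvStepA side) (pvPhi pre g) = pvPhi pre (ps.foldl pvStepG g) := by
  induction ps generalizing g with
  | nil => rfl
  | cons p ps ih =>
    rw [List.foldl_cons, List.foldl_cons, pvStep_comm pre side hside g hn hne p]
    exact ih _ (pvStepG_nodup g hn p) (pvStepG_ne g hne p)

-- the grouping fold keeps keys unique and groups nonempty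
lemma pvFold_props (ps : List (String × List (String × Int)))
    (g : PySem.Dict String (List (PySem.Dict String Int)))
    (hn : g.keys.Nodup) (hne : ∀ q ∈ g.items, q.2 ≠ []) :
    (ps.foldl pvStepG g).keys.Nodup ∧ ∀ q ∈ (ps.foldl pvStepG g).items, q.2 ≠ [] := by
  induction ps generalizing g with
  | nil => exact ⟨hn, hne⟩
  | cons p ps ih =>
    rw [List.foldl_cons]
    exact ih _ (pvStepG_nodup g hn p) (pvStepG_ne g hne p)

-- collapse both ports' nested folds over results to a fold over the flattened pair list
lemma pvFoldl_pairs {σ : Type} (step : σ → (String × List (String × Int)) → σ) (init : σ)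
    (results : List (String × List (String × List (String × Int)))) :
    results.foldl (fun a st => st.2.foldl step a) init
      = (results.flatMap (·.2)).foldl step init := by
  rw [List.foldl_flatMap]

theorem mergeCubeStats_spec : Claim_equal_mergeCubeStats := by
  intro results side _ _
  unfold Spec_mergeCubeStats mergeCubeStats mergeCubeStats_alt
  rw [show (fun (agg : PySem.Dict String (PySem.Dict String Int)) (p : String × List (String × Int)) =>
        if agg.contains p.1 = false then agg.insert p.1 (PySem.Dict.mk p.2)
        else agg.modify p.1 PySem.Dict.empty (fun d => pvMergeValsA side d (PySem.Dict.mk p.2)))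
      = pvStepA side from rfl]
  rw [show (fun (g : PySem.Dict String (List (PySem.Dict String Int))) (p : String × List (String × Int)) =>
        g.modify p.1 [] (· ++ [PySem.Dict.mk p.2])) = pvStepG from rfl]
  dsimp only
  rw [pvFoldl_pairs (pvStepA side), pvFoldl_pairs pvStepG]
  set ps := results.flatMap (·.2) with hps
  set G := ps.foldl pvStepG PySem.Dict.empty with hG
  obtain ⟨hGn, -⟩ := pvFold_props ps PySem.Dict.empty (by simp [PySem.Dict.keys, PySem.Dict.empty]) (by simp [PySem.Dict.empty])
  have hA : ps.foldl (pvStepA side) PySem.Dict.empty = pvPhi (side == "pre") G :=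
    pvInv (side == "pre") side rfl ps PySem.Dict.empty (by simp [PySem.Dict.keys, PySem.Dict.empty]) (by simp [PySem.Dict.empty])
  rw [hA]
  have hfresh : ∀ a ∈ G.items, (PySem.Dict.empty : PySem.Dict String (PySem.Dict String Int)).contains a.1 = false := by
    intro a _; simp [PySem.Dict.contains, PySem.Dict.empty]
  have hout : (G.items.foldl (fun out q => out.insert q.1 (pvFoldGroup (side == "pre") q.2))
      (PySem.Dict.empty : PySem.Dict String (PySem.Dict String Int))).items
      = G.items.map (fun q => (q.1, pvFoldGroup (side == "pre") q.2)) := by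
    have h := PySem.Dict.items_foldl_insert_fresh G.items (·.1)
      (fun q => pvFoldGroup (side == "pre") q.2)
      (PySem.Dict.empty : PySem.Dict String (PySem.Dict String Int)) hfresh hGn
    simpa [PySem.Dict.empty] using h
  rw [hout, pvPhi_items]
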